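-- pv_equiv track=rewrite | github.com/Tri334/Naive_Hoax_Covid | main.py | termUnik
-- ===== SOURCE A (Python) =====
-- def termUnik(list_berita,stopword):
--     unique = []
--     kata = " ".join(list_berita)
--     token = kata.split(' ')
--     for item in token:
--         if item:
--             if item not in stopword:
--                 if item not in unique:
--                     unique.append(item)
--     unique.sort()
--     return unique
-- ===== SOURCE B (Python) =====
-- def termUnik(list_berita, stopword):
--     # sort-then-collapse-adjacent-duplicates instead of membership-collect-then-sort
--     toks = [t for t in " ".join(list_berita).split(' ') if t and t not in stopword]
--     toks.sort()
--     result = []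
--     prev = None
--     for t in toks:
--         if prev != t:
--             result.append(t)
--             prev = t
--     return result
-- ===== Notes on version B (the rewrite author's own statement) =====
-- stated objective: alternative
-- what changed: Replaces A's per-token 'not in unique' membership scan (collect-unique-then-sort) by filter, sort, then one linear pass dropping adjacent duplicates.
import Mathlib
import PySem

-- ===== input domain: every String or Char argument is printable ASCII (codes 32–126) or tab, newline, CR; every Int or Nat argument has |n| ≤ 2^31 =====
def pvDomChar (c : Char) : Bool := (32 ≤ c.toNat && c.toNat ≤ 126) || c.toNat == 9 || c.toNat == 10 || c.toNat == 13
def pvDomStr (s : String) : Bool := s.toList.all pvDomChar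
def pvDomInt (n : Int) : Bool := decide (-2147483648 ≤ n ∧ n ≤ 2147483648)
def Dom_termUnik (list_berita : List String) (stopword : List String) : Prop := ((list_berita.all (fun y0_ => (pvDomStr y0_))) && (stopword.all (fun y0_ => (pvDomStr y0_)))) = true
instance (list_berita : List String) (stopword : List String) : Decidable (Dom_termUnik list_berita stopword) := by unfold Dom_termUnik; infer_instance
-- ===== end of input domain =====

-- B replaces A's per-token "not in unique" collect-then-sort by filter + sort +
-- one pass dropping adjacent duplicates (alternative decomposition, same exact result).

-- ===== PORT A =====
def termUnik (list_berita : List String) (stopword : List String) : List String :=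
  let kata := PySem.Str.join " " list_berita
  let token := (PySem.Str.split? kata " ").getD []   -- sep " " ≠ "": split? is always some
  let unique := token.foldl (fun unique item =>
    if item ≠ "" then
      if ¬ stopword.contains item then
        if ¬ unique.contains item then unique ++ [item] else unique
      else unique
    else unique) []
  PySem.List.sorted unique (fun x => x) false

-- ===== PORT B =====
def termUnik_alt (list_berita : List String) (stopword : List String) : List String :=
  let toks := ((PySem.Str.split? (PySem.Str.join " " list_berita) " ").getD []).filter
      (fun t => decide (t ≠ "") && !stopword.contains t)
  let toksSorted := PySem.List.sorted toks (fun x => x) false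
  let st := toksSorted.foldl
      (fun st t => if st.2 ≠ some t then (st.1 ++ [t], some t) else st)
      (([] : List String), (none : Option String))
  st.1

-- ===== PRECONDITION & SPEC =====
def Spec_termUnik (list_berita : List String) (stopword : List String) (out : List String) : Prop := out = termUnik_alt list_berita stopword
instance (list_berita : List String) (stopword : List String) (out : List String) : Decidable (Spec_termUnik list_berita stopword out) := by unfold Spec_termUnik; infer_instance

-- ===== CLAIM (what is proved, stated in full; the proofs are below) =====
def Claim_equal_termUnik : Prop := ∀ (list_berita : List String) (stopword : List String), Dom_termUnik list_berita stopword → Spec_termUnik list_berita stopword (termUnik list_berita stopword)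

-- ===== LEMMAS AND PROOFS =====

-- B's loop step, named (proof helper), and B's adjacent-duplicate-dropping pass as recursion
def step2 (st : List String × Option String) (t : String) : List String × Option String :=
  if st.2 = some t then st else (st.1 ++ [t], some t)

def ddAdj (p : String) : List String → List String
  | [] => []
  | x :: xs => if p ≠ x then x :: ddAdj x xs else ddAdj p xs

theorem step_eq :
    (fun (st : List String × Option String) (t : String) =>
      if st.2 ≠ some t then (st.1 ++ [t], some t) else st) = step2 := by
  funext st t
  by_cases h : st.2 = some t <;> simp [step2, h]

theorem foldl_dd_eq (l : List String) : ∀ (res : List String) (p : String),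
    (l.foldl step2 (res, some p)).1 = res ++ ddAdj p l := by
  induction l with
  | nil => intro res p; simp [ddAdj]
  | cons x xs ih =>
    intro res p
    by_cases h : p = x
    · subst h
      simp [List.foldl_cons, step2, ddAdj, ih]
    · simp [List.foldl_cons, step2, ddAdj, h, ih]

theorem dd_spec (l : List String) : ∀ (p : String), (p :: l).Pairwise (· ≤ ·) →
    (p :: ddAdj p l).Pairwise (· < ·) ∧ ∀ a, a ∈ p :: ddAdj p l ↔ a ∈ p :: l := by
  induction l with
  | nil => intro p _; simp [ddAdj]
  | cons x xs ih =>
    intro p hp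
    have hple : p ≤ x := (List.pairwise_cons.mp hp).1 x (by simp)
    have hxxs : (x :: xs).Pairwise (· ≤ ·) := (List.pairwise_cons.mp hp).2
    by_cases h : p = x
    · subst h
      obtain ⟨h1, h2⟩ := ih p hxxs
      refine ⟨by simpa [ddAdj] using h1, ?_⟩
      intro a
      have := h2 a
      simp [ddAdj] at this ⊢
      tauto
    · obtain ⟨h1, h2⟩ := ih x hxxs
      have hplt : p < x := lt_of_le_of_ne hple h
      refine ⟨?_, ?_⟩
      · rw [ddAdj, if_pos h]
        refine List.pairwise_cons.mpr ⟨?_, h1⟩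
        intro a ha
        have hax : a ∈ x :: xs := (h2 a).mp ha
        rcases List.mem_cons.mp hax with rfl | hmem
        · exact hplt
        · exact lt_of_lt_of_le hplt ((List.pairwise_cons.mp hxxs).1 a hmem)
      · intro a
        have := h2 a
        rw [ddAdj, if_pos h]
        simp at this ⊢
        tauto

theorem foldl_guard {α β : Type} (p : β → Bool) (g : α → β → α) (l : List β) :
    ∀ init : α, l.foldl (fun u x => if p x then g u x else u) init = (l.filter p).foldl g init := by
  induction l with
  | nil => intro init; simp
  | cons x xs ih =>
    intro init
    by_cases h : p x = true <;> simp [List.foldl_cons, h, ih]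

-- A's collecting loop equals building the Python set of the filtered tokens
theorem unique_eq_ofList (stopword : List String) (token : List String) :
    token.foldl (fun unique item =>
      if item ≠ "" then
        if ¬ stopword.contains item then
          if ¬ unique.contains item then unique ++ [item] else unique
        else unique
      else unique) []
    = PySem.Set.ofList (token.filter (fun t => decide (t ≠ "") && !stopword.contains t)) := by
  rw [PySem.Set.ofList_eq_foldl]
  rw [show (fun (unique : List String) (item : String) =>
      if item ≠ "" then
        if ¬ stopword.contains item then
          if ¬ unique.contains item then unique ++ [item] else unique
        else unique
      else unique)
    = (fun (u : List String) (x : String) =>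
        if (decide (x ≠ "") && !stopword.contains x) then PySem.Set.add u x else u) from ?_]
  · exact foldl_guard _ _ token []
  · funext u x
    by_cases h1 : x = ""
    · simp [h1]
    · by_cases h2 : x ∈ stopword
      · simp [h1, h2]
      · by_cases h3 : x ∈ u <;> simp [h1, h2, h3, PySem.Set.add]

-- B's result, for any token list, is A's result on that token list
theorem core (stopword token : List String) :
    PySem.List.sorted (PySem.Set.ofList (token.filter (fun t => decide (t ≠ "") && !stopword.contains t))) (fun x => x) false
    = ((PySem.List.sorted (token.filter (fun t => decide (t ≠ "") && !stopword.contains t)) (fun x => x) false).foldl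
        step2 (([] : List String), (none : Option String))).1 := by
  set toks := token.filter (fun t => decide (t ≠ "") && !stopword.contains t) with htoks
  rcases hs : PySem.List.sorted toks (fun x => x) false with _ | ⟨x, xs⟩
  · have h0 : toks = [] := (PySem.List.sorted_eq_nil_iff _ _ _).mp hs
    have hof : PySem.Set.ofList toks = [] := by simp [h0, PySem.Set.ofList]
    rw [hof]
    exact (PySem.List.sorted_eq_nil_iff _ _ _).mpr rfl
  · have hstep : ((x :: xs).foldl step2 (([] : List String), (none : Option String))).1
        = x :: ddAdj x xs := by
      rw [List.foldl_cons]
      have : step2 (([] : List String), (none : Option String)) x = ([x], some x) := by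
        simp [step2]
      rw [this]
      simpa using foldl_dd_eq xs [x] x
    rw [hstep]
    have hpw : (x :: xs).Pairwise (· ≤ ·) := by
      have h := PySem.List.sorted_pairwise toks (fun x => x)
      rw [hs] at h
      exact h
    obtain ⟨hlt, hmem⟩ := dd_spec xs x hpw
    have hnd1 : (x :: ddAdj x xs).Nodup := hlt.imp (fun {a b} hab => ne_of_lt hab)
    have hnd2 : (PySem.Set.ofList toks).Nodup := PySem.Set.nodup_ofList toks
    have hperm : (x :: ddAdj x xs).Perm (PySem.Set.ofList toks) := by
      refine (List.perm_ext_iff_of_nodup hnd1 hnd2).mpr ?_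
      intro a
      rw [hmem a, PySem.Set.mem_ofList]
      rw [← hs]
      exact PySem.List.mem_sorted _ _ _ _
    exact PySem.List.sorted_eq_of_perm_of_pairwise_lt _ _ (fun x => x) hperm hlt

-- ===== VERDICT (by name: the statement is the Claim_ definition above) =====
theorem termUnik_spec : Claim_equal_termUnik := by
  intro list_berita stopword _
  unfold Spec_termUnik
  simp only [termUnik, termUnik_alt]
  rw [step_eq, unique_eq_ofList]
  exact core stopword _
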